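-- pv_equiv track=rewrite | github.com/KE-mohia/Wk1--Code-Challenge | value_of_consonant.py | solve
-- ===== SOURCE A (Python) =====
-- def solve(word):
--     def value_of_consonant(c):
--         return ord(c) - ord('a') + 1
--
--     consonant_substrings = []
--     current_substring = 0
--
--     for char in word:
--         if char not in "aeiou":
--             current_substring += value_of_consonant(char)
--         else:
--             consonant_substrings.append(current_substring)
--             current_substring = 0
--
--     consonant_substrings.append(current_substring)
--
--     return max(consonant_substrings)
-- ===== SOURCE B (Python) =====
-- def solve(word):
--     vowels = "aeiou"
--     # prefix sums of per-character values (vowels contribute 0)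
--     prefix = [0]
--     for c in word:
--         prefix.append(prefix[-1] + (0 if c in vowels else ord(c) - 96))
--     # segment boundaries: start of word, position after each vowel, end of word
--     bounds = [0] + [i + 1 for i, c in enumerate(word) if c in vowels] + [len(word)]
--     # each vowel-delimited segment's sum is a difference of prefix sums
--     return max(prefix[b] - prefix[a] for a, b in zip(bounds, bounds[1:]))
-- ===== Notes on version B (the rewrite author's own statement) =====
-- stated objective: alternative
-- what changed: B precomputes a prefix-sum array of character values (vowels counting 0) and the list of segment boundary positions (word start, position after each vowel, word end), and returns the max of prefix-sum differences over consecutive boundary pairs, instead of A's single accumulator pass that resets at each vowel and collects segment sums.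
import Mathlib
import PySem

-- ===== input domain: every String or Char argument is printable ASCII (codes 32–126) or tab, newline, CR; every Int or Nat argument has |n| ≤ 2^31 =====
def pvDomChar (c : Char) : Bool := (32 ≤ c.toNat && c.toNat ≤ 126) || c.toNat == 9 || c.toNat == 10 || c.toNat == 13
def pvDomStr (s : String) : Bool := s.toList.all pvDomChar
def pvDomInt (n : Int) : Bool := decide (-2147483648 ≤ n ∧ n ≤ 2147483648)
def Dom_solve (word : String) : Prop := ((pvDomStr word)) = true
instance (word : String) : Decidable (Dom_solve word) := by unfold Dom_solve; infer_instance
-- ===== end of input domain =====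

-- B replaces A's single accumulator pass (reset at each vowel, collecting segment sums) by a
-- prefix-sum array plus the list of segment boundary positions, taking the max of prefix
-- differences over consecutive boundary pairs (objective: alternative).

-- membership test 'c in "aeiou"', shared by both programs
def pvVowel (c : Char) : Bool := "aeiou".toList.contains c

-- ===== PORT A =====
-- loop body of A: state = (consonant_substrings, current_substring)
def pvStepA (st : List Int × Int) (char : Char) : List Int × Int :=
  if pvVowel char = false then
    (st.1, st.2 + ((char.toNat : Int) - 97 + 1))
  else
    (st.1 ++ [st.2], 0)

def solve (word : String) : Int :=
  -- final (consonant_substrings, current_substring) after the loop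
  let st := word.toList.foldl pvStepA ([], 0)
  -- Python's max over consonant_substrings + [current_substring]; nonempty, so none is unreachable
  match PySem.List.max? (st.1 ++ [st.2]) (fun x => x) with
  | some v => v
  | none => 0

-- ===== PORT B =====
-- B's local variable 'prefix': prefix sums of per-character values, built by appending
def pvPrefix (l : List Char) : List Int :=
  l.foldl
    (fun p c => p ++ [PySem.List.pyGetD p (-1) 0 + (if pvVowel c then 0 else (c.toNat : Int) - 96)])
    [0]

-- B's local variable 'bounds': word start, position after each vowel, word end
def pvBounds (l : List Char) : List Int :=
  [0] ++ ((PySem.List.enumerate l).filter (fun ic => pvVowel ic.2)).map (fun ic => ic.1 + 1)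
      ++ [(l.length : Int)]

-- B's generator: prefix[b] - prefix[a] over consecutive boundary pairs
def pvDiffs (l : List Char) : List Int :=
  ((pvBounds l).zip ((pvBounds l).drop 1)).map
    (fun ab => PySem.List.pyGetD (pvPrefix l) ab.2 0 - PySem.List.pyGetD (pvPrefix l) ab.1 0)

def solve_alt (word : String) : Int :=
  -- Python's max over the generator; bounds has ≥ 2 entries so diffs is nonempty, none unreachable
  match PySem.List.max? (pvDiffs word.toList) (fun x => x) with
  | some v => v
  | none => 0

-- ===== PRECONDITION & SPEC =====
def Spec_solve (word : String) (out : Int) : Prop := out = solve_alt word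
instance (word : String) (out : Int) : Decidable (Spec_solve word out) := by unfold Spec_solve; infer_instance

-- ===== CLAIM (what is proved, stated in full; the proofs are below) =====
def Claim_equal_solve : Prop := ∀ (word : String), Dom_solve word → Spec_solve word (solve word)

-- ===== LEMMAS AND PROOFS =====

-- per-character value: vowels count 0, any other char counts ord(c) - 96
def pvVal (c : Char) : Int := if pvVowel c then 0 else (c.toNat : Int) - 96

-- reference list of the vowel-delimited segment sums, head-first
def pvAddHead (x : Int) : List Int → List Int
  | [] => [x]
  | y :: ys => (x + y) :: ys

def pvSeg : List Char → List Int
  | [] => [0]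
  | c :: cs => if pvVowel c then 0 :: pvSeg cs else pvAddHead (pvVal c) (pvSeg cs)

lemma pvSeg_ne_nil (l : List Char) : pvSeg l ≠ [] := by
  cases l with
  | nil => simp [pvSeg]
  | cons c cs =>
    simp only [pvSeg]
    split
    · simp
    · cases h : pvSeg cs <;> simp [pvAddHead]

-- ---- A side: the fold produces exactly acc ++ (segment sums with cur added to the first)

lemma A_fold (cs : List Char) (acc : List Int) (cur : Int) :
    (cs.foldl pvStepA (acc, cur)).1 ++ [(cs.foldl pvStepA (acc, cur)).2]
      = acc ++ pvAddHead cur (pvSeg cs) := by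
  induction cs generalizing acc cur with
  | nil => simp [pvSeg, pvAddHead]
  | cons c cs ih =>
    simp only [List.foldl_cons, pvStepA, pvSeg]
    by_cases hv : pvVowel c = true
    · simp only [hv, Bool.true_eq_false, if_false, if_true]
      rw [ih]
      cases h : pvSeg cs with
      | nil => exact absurd h (pvSeg_ne_nil cs)
      | cons y ys => simp [pvAddHead]
    · simp only [hv, Bool.false_eq_true, if_true, if_false]
      rw [ih]
      have hval : pvVal c = (c.toNat : Int) - 96 := by
        simp [pvVal, hv]
      cases h : pvSeg cs with
      | nil => exact absurd h (pvSeg_ne_nil cs)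
      | cons y ys => simp [pvAddHead, hval]; ring

-- ---- B side: the prefix list, characterised structurally

def pvExt : List Char → Int → List Int
  | [], _ => []
  | c :: cs, x => (x + pvVal c) :: pvExt cs (x + pvVal c)

def pvPre : List Char → List Int
  | [] => [0]
  | c :: cs => 0 :: (pvPre cs).map (pvVal c + ·)

lemma B_fold (l : List Char) (p : List Int) (hp : p ≠ []) :
    l.foldl (fun p c => p ++ [PySem.List.pyGetD p (-1) 0 + pvVal c]) p
      = p ++ pvExt l (p.getLast hp) := by
  induction l generalizing p with
  | nil => simp [pvExt]
  | cons c cs ih =>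
    simp only [List.foldl_cons, pvExt]
    rw [PySem.List.pyGetD_neg_one p 0 hp,
        ih (p ++ [p.getLast hp + pvVal c]) (by simp),
        List.getLast_concat]
    simp

lemma pvExt_shift (l : List Char) (w x : Int) :
    pvExt l (w + x) = (pvExt l x).map (w + ·) := by
  induction l generalizing x with
  | nil => simp [pvExt]
  | cons c cs ih => simp [pvExt, add_assoc, ih]

lemma pvPre_eq_ext (l : List Char) : pvPre l = 0 :: pvExt l 0 := by
  induction l with
  | nil => simp [pvPre, pvExt]
  | cons c cs ih =>
    simp only [pvPre, ih, pvExt, List.map_cons, add_zero]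
    rw [← pvExt_shift]
    simp

lemma pvPrefix_eq (l : List Char) : pvPrefix l = pvPre l := by
  have hstep : (fun (p : List Int) (c : Char) =>
      p ++ [PySem.List.pyGetD p (-1) 0 + (if pvVowel c then 0 else (c.toNat : Int) - 96)])
      = fun p c => p ++ [PySem.List.pyGetD p (-1) 0 + pvVal c] := by
    funext p c; simp [pvVal]
  rw [pvPrefix, hstep, B_fold l [0] (by simp), pvPre_eq_ext]
  rfl

lemma length_pvPre (l : List Char) : (pvPre l).length = l.length + 1 := by
  induction l with
  | nil => rfl
  | cons c cs ih => simp [pvPre, ih]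

lemma pvPre_head (l : List Char) : (pvPre l)[0]?.getD 0 = 0 := by
  cases l <;> simp [pvPre]

-- ---- B side: boundary positions (as Nats)

def pvVIdx : List Char → List Nat
  | [] => []
  | c :: cs => (if pvVowel c then [0] else []) ++ (pvVIdx cs).map (· + 1)

def pvNB (l : List Char) : List Nat := 0 :: ((pvVIdx l).map (· + 1) ++ [l.length])

lemma pvVIdx_lt (l : List Char) : ∀ i ∈ pvVIdx l, i < l.length := by
  induction l with
  | nil => simp [pvVIdx]
  | cons c cs ih =>
    intro i hi
    simp only [pvVIdx, List.mem_append, List.mem_map] at hi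
    rcases hi with hi | ⟨j, hj, rfl⟩
    · split at hi <;> simp_all
    · have := ih j hj; simp; omega

lemma pvNB_le (l : List Char) : ∀ b ∈ pvNB l, b ≤ l.length := by
  intro b hb
  rcases List.mem_cons.mp hb with rfl | h2
  · omega
  rcases List.mem_append.mp h2 with h3 | h4
  · obtain ⟨j, hj, rfl⟩ := List.mem_map.mp h3
    have := pvVIdx_lt l j hj; omega
  · simp at h4; omega

-- the port's bounds list equals the Nat boundary list, cast to Int
lemma enum_filter_eq (l : List Char) (s : Int) :
    ((PySem.List.enumerate l s).filter (fun ic => pvVowel ic.2)).map (fun ic => ic.1 + 1)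
      = (pvVIdx l).map (fun (i : Nat) => (s + i + 1 : Int)) := by
  induction l generalizing s with
  | nil => simp [PySem.List.enumerate_nil, pvVIdx]
  | cons c cs ih =>
    rw [PySem.List.enumerate_cons, List.filter_cons]
    by_cases hv : pvVowel c = true
    · simp only [hv, if_true, List.map_cons, pvVIdx, List.singleton_append]
      rw [ih (s + 1), List.map_map]
      refine congrArg₂ List.cons (by push_cast; ring) ?_
      apply List.map_congr_left
      intro j _
      simp [Function.comp]
      ring
    · simp only [hv, Bool.false_eq_true, if_false, pvVIdx, List.nil_append]
      rw [ih (s + 1), List.map_map]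
      apply List.map_congr_left
      intro j _
      simp [Function.comp]
      ring

lemma pvBounds_eq (l : List Char) : pvBounds l = (pvNB l).map (fun (n : Nat) => (n : Int)) := by
  rw [pvBounds, enum_filter_eq l 0]
  simp only [pvNB, List.map_cons, List.map_append, List.map_map, List.cons_append,
    List.nil_append, Nat.cast_zero]
  refine congrArg₂ List.cons rfl (congrArg₂ (· ++ ·) ?_ rfl)
  apply List.map_congr_left
  intro j _
  simp only [Function.comp_apply]
  push_cast
  ring

-- ---- the diffs list on the Nat side

def pvDif (l : List Char) : List Int :=
  ((pvNB l).zip ((pvNB l).drop 1)).map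
    (fun ab => (pvPre l)[ab.2]?.getD 0 - (pvPre l)[ab.1]?.getD 0)

-- dropping the common head shifts every index by one
lemma dif_shift (q : List Int) (y : Int) (bs : List Nat) :
    ((bs.map (· + 1)).zip ((bs.map (· + 1)).drop 1)).map
        (fun ab => (y :: q)[ab.2]?.getD 0 - (y :: q)[ab.1]?.getD 0)
      = (bs.zip (bs.drop 1)).map (fun ab => q[ab.2]?.getD 0 - q[ab.1]?.getD 0) := by
  rw [← List.map_drop, List.zip_map, List.map_map]
  apply List.map_congr_left
  intro ab _
  simp [Prod.map]

-- a constant offset on the prefix list cancels in every in-range difference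
lemma dif_offset (q : List Int) (w : Int) (bs : List Nat)
    (h : ∀ b ∈ bs, b < q.length) :
    (bs.zip (bs.drop 1)).map
        (fun ab => (q.map (w + ·))[ab.2]?.getD 0 - (q.map (w + ·))[ab.1]?.getD 0)
      = (bs.zip (bs.drop 1)).map (fun ab => q[ab.2]?.getD 0 - q[ab.1]?.getD 0) := by
  apply List.map_congr_left
  intro ab hab
  have h1 : ab.1 ∈ bs := (List.of_mem_zip hab).1
  have h2 : ab.2 ∈ bs := (bs.drop_subset 1) (List.of_mem_zip hab).2
  have g1 := h _ h1
  have g2 := h _ h2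
  simp [List.getElem?_map, List.getElem?_eq_getElem g1, List.getElem?_eq_getElem g2]

lemma dif_eq_seg (l : List Char) : pvDif l = pvSeg l := by
  induction l with
  | nil => simp [pvDif, pvNB, pvVIdx, pvPre, pvSeg]
  | cons c cs ih =>
    by_cases hv : pvVowel c = true
    · -- vowel: new bounds are 0 :: (old bounds + 1), prefix just gains a leading 0
      have hb : pvNB (c :: cs) = 0 :: (pvNB cs).map (· + 1) := by
        simp [pvNB, pvVIdx, hv, List.map_map]
      have hval0 : pvVal c = 0 := by simp [pvVal, hv]
      have hpre : pvPre (c :: cs) = 0 :: pvPre cs := by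
        simp [pvPre, hval0]
      unfold pvDif
      rw [hb, hpre]
      cases hnb : pvNB cs with
      | nil => simp [pvNB] at hnb
      | cons b0 bs =>
        have hb0 : b0 = 0 := by simp [pvNB] at hnb; omega
        subst hb0
        simp only [List.map_cons, List.drop_succ_cons, List.drop_zero, List.zip_cons_cons,
          List.map_cons]
        have hrest := dif_shift (pvPre cs) 0 (0 :: bs)
        simp only [List.map_cons, List.drop_succ_cons, List.drop_zero] at hrest
        rw [hrest]
        unfold pvDif at ih
        rw [hnb] at ih
        simp only [List.drop_succ_cons, List.drop_zero] at ih
        rw [ih]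
        have hhead : (0 :: pvPre cs)[0 + 1]?.getD 0 - (0 :: pvPre cs)[0]?.getD 0 = 0 := by
          simp [pvPre_head]
        rw [hhead, pvSeg]
        simp [hv]
    · -- consonant: first difference gains pvVal c, the rest are unchanged
      have hb : pvNB (c :: cs) = 0 :: ((pvVIdx cs).map (· + 1) ++ [cs.length]).map (· + 1) := by
        simp [pvNB, pvVIdx, hv, List.map_map]
      have hpre : pvPre (c :: cs) = 0 :: (pvPre cs).map (pvVal c + ·) := rfl
      unfold pvDif
      rw [hb, hpre]
      have hTle : ∀ b ∈ (pvVIdx cs).map (· + 1) ++ [cs.length], b < (pvPre cs).length := by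
        intro b hbm
        have hmem : b ∈ pvNB cs := by
          rw [pvNB]; exact List.mem_cons_of_mem _ hbm
        have := pvNB_le cs b hmem
        rw [length_pvPre]; omega
      cases hTc : (pvVIdx cs).map (· + 1) ++ [cs.length] with
      | nil => simp at hTc
      | cons t T' =>
        rw [hTc] at hTle
        simp only [List.map_cons, List.drop_succ_cons, List.drop_zero, List.zip_cons_cons,
          List.map_cons]
        have hrest := dif_shift ((pvPre cs).map (pvVal c + ·)) 0 (t :: T')
        simp only [List.map_cons, List.drop_succ_cons, List.drop_zero] at hrest
        rw [hrest]
        have hoff := dif_offset (pvPre cs) (pvVal c) (t :: T') hTle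
        simp only [List.drop_succ_cons, List.drop_zero] at hoff
        rw [hoff]
        have ht : t < (pvPre cs).length := hTle t (List.mem_cons_self ..)
        have e := List.getElem?_eq_getElem ht
        unfold pvDif at ih
        have hnb : pvNB cs = 0 :: t :: T' := by rw [pvNB, hTc]
        rw [hnb] at ih
        simp only [List.drop_succ_cons, List.drop_zero, List.zip_cons_cons, List.map_cons] at ih
        rw [pvSeg]
        simp only [hv, Bool.false_eq_true, if_false]
        rw [← ih]
        have hh : (0 :: (pvPre cs).map (pvVal c + ·))[t + 1]?.getD 0
            - (0 :: (pvPre cs).map (pvVal c + ·))[0]?.getD 0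
            = pvVal c + ((pvPre cs)[t]?.getD 0 - (pvPre cs)[0]?.getD 0) := by
          simp [e, pvPre_head]
        rw [hh]
        simp [pvAddHead]

-- ---- assemble both ports

lemma solve_eq (word : String) :
    solve word = (match PySem.List.max? (pvSeg word.toList) (fun x => x) with
                  | some v => v | none => 0) := by
  have hA := A_fold word.toList [] 0
  simp only [List.nil_append] at hA
  have h0 : pvAddHead 0 (pvSeg word.toList) = pvSeg word.toList := by
    cases h : pvSeg word.toList with
    | nil => exact absurd h (pvSeg_ne_nil _)
    | cons y ys => simp [pvAddHead]
  rw [h0] at hA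
  show (match PySem.List.max? ((word.toList.foldl pvStepA ([], 0)).1
        ++ [(word.toList.foldl pvStepA ([], 0)).2]) (fun x => x) with
        | some v => v | none => 0) = _
  rw [hA]

lemma solve_alt_eq (word : String) :
    solve_alt word = (match PySem.List.max? (pvSeg word.toList) (fun x => x) with
                      | some v => v | none => 0) := by
  have hd : pvDiffs word.toList = pvSeg word.toList := by
    rw [pvDiffs, pvPrefix_eq, pvBounds_eq, ← List.map_drop, List.zip_map, List.map_map]
    rw [← dif_eq_seg]
    unfold pvDif
    apply List.map_congr_left
    intro ab _
    simp [Prod.map, PySem.List.pyGetD_natCast, List.getD_eq_getElem?_getD]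
  rw [solve_alt, hd]

-- ===== VERDICT (by name: the statement is the Claim_ definition above) =====
theorem solve_spec : Claim_equal_solve := by
  intro word _
  unfold Spec_solve
  rw [solve_eq, solve_alt_eq]
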